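-- pv_equiv track=rewrite | github.com/mugglim/python-algo-study | categories/구현/pg-imp-괄호_변환.py | solution
-- ===== SOURCE A (Python) =====
-- def check1(s):
--     stack = []
--     for x in s:
--         if x == "(":
--             stack.append("(")
--         elif x == ")":
--             if not stack:
--                 return False
--             else:
--                 stack.pop()
--
--     if len(stack) != 0:
--         return False
--     else:
--         return True
--
-- def split_u_v(s):
--     a,b = 0,0
--     i = 0
--     while i < len(s):
--         if s[i] == ")":
--             a += 1
--         elif s[i] == "(":
--             b += 1
--
--         if a == b:
--             i += 1
--             break
--         i += 1
--
--     return [s[:i],s[i:]]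
--
-- def switch_bracket(s):
--     tmp = ""
--     for x in s:
--         tmp += ")" if x == "(" else "("
--     return tmp
--
-- def solution(p):
--     # 1.
--     if p == "":
--         return ""
--     # 2.
--     u,v = split_u_v(p)
--
--     # 3.
--     if check1(u) == True:
--         return u + solution(v)
--     else:
--         return "(" + solution(v) + ")" + switch_bracket(u[1:-1])
-- ===== SOURCE B (Python) =====
-- def solution(p):
--     # one fused scan per segment: split point, validity flag (balance never
--     # negative and returns to zero), and bracket flip are computed in a single
--     # pass; pieces are joined once at the end.
--     parts = []
--     tail = []
--     i, n = 0, len(p)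
--     while i < n:
--         bal = 0
--         neg = False
--         j = i
--         while j < n:
--             c = p[j]
--             if c == '(':
--                 bal += 1
--             elif c == ')':
--                 bal -= 1
--                 if bal < 0:
--                     neg = True
--             j += 1
--             if bal == 0:
--                 break
--         u = p[i:j]
--         if bal == 0 and not neg:
--             parts.append(u)
--         else:
--             mid = u[1:-1]
--             parts.append('(')
--             tail.append(')' + ''.join(')' if c == '(' else '(' for c in mid))
--         i = j
--     return ''.join(parts) + ''.join(reversed(tail))
-- ===== Notes on version B (the rewrite author's own statement) =====
-- stated objective: faster
-- what changed: Replaces A's recursion over split_u_v/check1/switch_bracket (three separate passes per segment plus string concatenation at every recursion level) by one iterative fused scan per segment that tracks a balance counter and a went-negative flag, collecting prefix pieces and a suffix stack that are joined once at the end.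
import Mathlib
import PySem

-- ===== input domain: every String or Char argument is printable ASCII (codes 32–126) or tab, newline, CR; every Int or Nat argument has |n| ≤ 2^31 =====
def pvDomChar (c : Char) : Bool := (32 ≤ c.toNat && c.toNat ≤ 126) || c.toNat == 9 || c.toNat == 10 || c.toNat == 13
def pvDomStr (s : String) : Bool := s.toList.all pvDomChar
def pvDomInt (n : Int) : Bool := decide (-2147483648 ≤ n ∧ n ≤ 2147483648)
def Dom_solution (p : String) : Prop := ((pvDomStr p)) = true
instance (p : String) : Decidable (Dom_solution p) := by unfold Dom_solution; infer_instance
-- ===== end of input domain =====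

-- B fuses A's three per-segment helper passes (split_u_v, check1, switch_bracket) and the
-- recursion into one iterative scan with a balance counter and a went-negative flag,
-- joining the collected pieces once at the end (measured faster).

-- ===== PORT A =====
-- check1: loop over s with a stack, early `return False` when popping an empty stack
def check1Aux : List Char → List Char → Bool
  | [], stack => stack.length == 0
  | x :: xs, stack =>
    if x = '(' then check1Aux xs ('(' :: stack)
    else if x = ')' then
      if stack = [] then false else check1Aux xs stack.tail
    else check1Aux xs stack

def check1 (s : List Char) : Bool := check1Aux s []

-- split_u_v's while loop (state i, a, b; s[i] is the head of the not-yet-scanned suffix); returns the final i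
def splitLoop : List Char → Nat → Nat → Nat → Nat
  | [], i, _, _ => i
  | c :: rest, i, a, b =>
    let a' := if c = ')' then a + 1 else a
    let b' := if c ≠ ')' ∧ c = '(' then b + 1 else b
    if a' = b' then i + 1 else splitLoop rest (i + 1) a' b'

def split_u_v (s : List Char) : List Char × List Char :=
  let i := splitLoop s 0 0 0
  (s.take i, s.drop i)

-- switch_bracket: tmp accumulation by foldl
def switch_bracket (s : List Char) : List Char :=
  s.foldl (fun tmp x => tmp ++ [if x = '(' then ')' else '(']) []

-- termination helper for port A, cited by name in decreasing_by
theorem splitLoop_gt (s : List Char) (i a b : Nat) (hs : s ≠ []) :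
    i < splitLoop s i a b := by
  induction s generalizing i a b with
  | nil => exact absurd rfl hs
  | cons c rest ih =>
    show i < splitLoop (c :: rest) i a b
    rw [splitLoop]
    split_ifs
    all_goals first
      | exact Nat.lt_succ_self i
      | (cases rest with
         | nil => exact Nat.lt_succ_self i
         | cons d t =>
             exact Nat.lt_trans (Nat.lt_succ_self i) (ih (i + 1) _ _ (List.cons_ne_nil d t)))

theorem split_u_v_snd_lt (p : List Char) (hp : p ≠ []) :
    (split_u_v p).2.length < p.length := by
  have h1 : 0 < p.length := List.length_pos_iff.mpr hp
  have h2 : 0 < splitLoop p 0 0 0 := splitLoop_gt p 0 0 0 hp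
  simp only [split_u_v, List.length_drop]
  omega

def solutionL (p : List Char) : List Char :=
  if hp : p = [] then []
  else
    let uv := split_u_v p
    let u := uv.1
    let v := uv.2
    if check1 u = true then u ++ solutionL v
    else '(' :: solutionL v ++ [')'] ++ switch_bracket (PySem.List.slice u (some 1) (some (-1)))
termination_by p.length
decreasing_by all_goals exact split_u_v_snd_lt p hp

def solution (p : String) : String := String.ofList (solutionL p.toList)

-- ===== PORT B =====
-- ')' if c == '(' else '(' (the inline flip in Source B's join)
def flipChar (c : Char) : Char := if c = '(' then ')' else '('

-- Source B's inner while loop: one scan collecting the segment u, the rest v,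
-- the final balance and the went-negative flag
def scanB : List Char → Int → Bool → (List Char × List Char × Int × Bool)
  | [], bal, neg => ([], [], bal, neg)
  | c :: rest, bal, neg =>
    let bal' := if c = '(' then bal + 1 else if c = ')' then bal - 1 else bal
    let neg' := if c = ')' ∧ bal' < 0 then true else neg
    if bal' = 0 then ([c], rest, bal', neg')
    else
      let r := scanB rest bal' neg'
      (c :: r.1, r.2.1, r.2.2.1, r.2.2.2)

-- termination helper for loopB, cited by name in decreasing_by
theorem scanB_v_lt (p : List Char) (bal : Int) (neg : Bool) (hp : p ≠ []) :
    (scanB p bal neg).2.1.length < p.length := by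
  induction p generalizing bal neg with
  | nil => exact absurd rfl hp
  | cons c rest ih =>
    simp only [scanB]
    by_cases hb : (if c = '(' then bal + 1 else if c = ')' then bal - 1 else bal) = 0
    · rw [if_pos hb]; simp
    · rw [if_neg hb]
      cases rest with
      | nil => simp [scanB]
      | cons d t =>
        exact Nat.lt_trans (ih _ _ (List.cons_ne_nil d t)) (by simp)

-- Source B's outer while loop: prefix pieces and the suffix stack, joined at the end
def loopB : List Char → List (List Char) → List (List Char) → List Char
  | [], parts, tail => parts.flatten ++ tail.reverse.flatten
  | x :: xs, parts, tail =>
    let r := scanB (x :: xs) 0 false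
    if r.2.2.1 = 0 ∧ r.2.2.2 = false then loopB r.2.1 (parts ++ [r.1]) tail
    else loopB r.2.1 (parts ++ [['(']])
           (tail ++ [')' :: (PySem.List.slice r.1 (some 1) (some (-1))).map flipChar])
termination_by p => p.length
decreasing_by all_goals exact scanB_v_lt (x :: xs) 0 false (List.cons_ne_nil x xs)

def solution_alt (p : String) : String := String.ofList (loopB p.toList [] [])

-- ===== PRECONDITION & SPEC =====
def Spec_solution (p : String) (out : String) : Prop := out = solution_alt p
instance (p : String) (out : String) : Decidable (Spec_solution p out) := by unfold Spec_solution; infer_instance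

-- ===== CLAIM (what is proved, stated in full; the proofs are below) =====
def Claim_equal_solution : Prop := ∀ (p : String), Dom_solution p → Spec_solution p (solution p)

-- ===== LEMMAS AND PROOFS =====
-- the neg flag is monotone: once true it stays true
theorem scanB_neg_mono (p : List Char) (bal : Int) :
    (scanB p bal true).2.2.2 = true := by
  induction p generalizing bal with
  | nil => simp [scanB]
  | cons c rest ih =>
    simp only [scanB]
    by_cases hb : (if c = '(' then bal + 1 else if c = ')' then bal - 1 else bal) = 0
    · rw [if_pos hb]; simp
    · rw [if_neg hb]; simpa using ih _

-- splitLoop's index argument only shifts the result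
theorem splitLoop_shift (p : List Char) (i a b : Nat) :
    splitLoop p i a b = i + splitLoop p 0 a b := by
  induction p generalizing i a b with
  | nil => simp [splitLoop]
  | cons c rest ih =>
    rw [splitLoop, splitLoop]
    by_cases h : (if c = ')' then a + 1 else a) = (if c ≠ ')' ∧ c = '(' then b + 1 else b)
    · simp [h]
    · simp only [if_neg h]
      rw [ih (i+1), ih 1]
      omega

-- the fused scan finds exactly split_u_v's split point (bal = opens - closes invariant)
theorem scanB_split (p : List Char) (a b : Nat) (bal : Int) (neg : Bool)
    (hbal : bal = (b : Int) - (a : Int)) :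
    (scanB p bal neg).1 = p.take (splitLoop p 0 a b) ∧
    (scanB p bal neg).2.1 = p.drop (splitLoop p 0 a b) := by
  induction p generalizing a b bal neg with
  | nil => simp [scanB, splitLoop]
  | cons c rest ih =>
    simp only [scanB, splitLoop]
    set a' := if c = ')' then a + 1 else a with ha'
    set b' := if c ≠ ')' ∧ c = '(' then b + 1 else b with hb'
    set bal' := if c = '(' then bal + 1 else if c = ')' then bal - 1 else bal with hbal'
    have hb2 : bal' = (b' : Int) - (a' : Int) := by
      rw [hbal', ha', hb', hbal]
      by_cases hc1 : c = '(' <;> by_cases hc2 : c = ')' <;>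
        simp [hc1, hc2] <;> omega
    by_cases h0 : a' = b'
    · have hz : bal' = 0 := by rw [hb2, h0]; ring
      simp [hz, h0]
    · have hz : ¬ bal' = 0 := by rw [hb2]; omega
      have hsh : splitLoop rest (0+1) a' b' = splitLoop rest 0 a' b' + 1 := by
        rw [splitLoop_shift]; omega
      rw [if_neg hz, if_neg h0, hsh]
      exact ⟨by rw [List.take_succ_cons]; exact congrArg (c :: ·) (ih a' b' bal' _ hb2).1,
             by rw [List.drop_succ_cons]; exact (ih a' b' bal' _ hb2).2⟩

-- check1 of the scanned segment is exactly "balance ended at 0 and never went negative"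
theorem scanB_check (p : List Char) (L : Nat) (bal : Int) (hbal : bal = (L : Int)) :
    check1Aux (scanB p bal false).1 (List.replicate L '(') = true ↔
    ((scanB p bal false).2.2.1 = 0 ∧ (scanB p bal false).2.2.2 = false) := by
  induction p generalizing L bal with
  | nil =>
    simp [scanB, check1Aux, hbal]
  | cons c rest ih =>
    simp only [scanB]
    by_cases hc1 : c = '('
    · subst hc1
      have hz : ¬ ((if ('(':Char) = '(' then bal + 1 else if ('(':Char) = ')' then bal - 1 else bal) = 0) := by
        simp [hbal]; omega
      rw [if_neg hz]
      have h := ih (L+1) (bal+1) (by rw [hbal]; push_cast; ring)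
      simp only [List.replicate_succ] at h
      simpa [check1Aux] using h
    · by_cases hc2 : c = ')'
      · subst hc2
        rcases Nat.eq_zero_or_pos L with hL | hL
        · -- pop of an empty stack: neg becomes true, check1 returns False
          subst hL
          have hz : ¬ ((if (')':Char) = '(' then bal + 1 else if (')':Char) = ')' then bal - 1 else bal) = 0) := by
            simp [hc1, hbal]
          rw [if_neg hz]
          simp [check1Aux, hc1, hbal]
          intro _
          exact scanB_neg_mono rest (-1)
        · by_cases h1 : L = 1
          · subst h1
            have hz : (if (')':Char) = '(' then bal + 1 else if (')':Char) = ')' then bal - 1 else bal) = 0 := by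
              simp [hc1, hbal]
            rw [if_pos hz]
            simp [check1Aux, hc1, hbal]
          · have hz : ¬ ((if (')':Char) = '(' then bal + 1 else if (')':Char) = ')' then bal - 1 else bal) = 0) := by
              simp [hc1, hbal]; omega
            rw [if_neg hz]
            have h := ih (L-1) (bal-1) (by rw [hbal]; omega)
            have hrep : List.replicate L '(' = '(' :: List.replicate (L-1) '(' := by
              have hL' : L - 1 + 1 = L := by omega
              rw [← hL', List.replicate_succ, hL']
            rw [hrep]
            have hneg : ¬ (bal - 1 < 0) := by rw [hbal]; omega
            simpa [check1Aux, hc1, hneg] using h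
      · by_cases h0 : L = 0
        · subst h0
          have hz : (if c = '(' then bal + 1 else if c = ')' then bal - 1 else bal) = 0 := by
            simp [hc1, hc2, hbal]
          rw [if_pos hz]
          simp [check1Aux, hc1, hc2, hbal]
        · have hz : ¬ ((if c = '(' then bal + 1 else if c = ')' then bal - 1 else bal) = 0) := by
            simp [hc1, hc2, hbal]; omega
          rw [if_neg hz]
          have h := ih L bal hbal
          simpa [check1Aux, hc1, hc2] using h

-- switch_bracket is map flipChar
theorem switch_bracket_foldl (s : List Char) (acc : List Char) :
    s.foldl (fun tmp x => tmp ++ [if x = '(' then ')' else '(']) acc = acc ++ s.map flipChar := by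
  induction s generalizing acc with
  | nil => simp
  | cons c rest ih => simp [ih, flipChar]

theorem switch_bracket_eq_map (s : List Char) : switch_bracket s = s.map flipChar := by
  simpa [switch_bracket] using switch_bracket_foldl s []

-- the main loop invariant: loopB accumulates exactly A's recursive result
theorem loopB_eq_aux (n : Nat) (p : List Char) (hn : p.length ≤ n) (parts tail : List (List Char)) :
    loopB p parts tail = parts.flatten ++ solutionL p ++ tail.reverse.flatten := by
  induction n generalizing p parts tail with
  | zero =>
    have hp : p = [] := List.length_eq_zero_iff.mp (Nat.le_zero.mp hn)
    simp [hp, loopB, solutionL]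
  | succ n ihn =>
    cases p with
    | nil => simp [loopB, solutionL]
    | cons c rest =>
      rw [loopB, solutionL]
      simp only [dif_neg (List.cons_ne_nil c rest)]
      have hlt := scanB_v_lt (c :: rest) 0 false (List.cons_ne_nil c rest)
      have hle : (scanB (c :: rest) 0 false).2.1.length ≤ n := by
        have := Nat.lt_of_lt_of_le hlt hn
        omega
      have hsplit := scanB_split (c :: rest) 0 0 0 false (by norm_num)
      have hcheck := scanB_check (c :: rest) 0 0 (by norm_num)
      have hu : (scanB (c :: rest) 0 false).1 = (split_u_v (c :: rest)).1 := by
        rw [hsplit.1]; rfl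
      have hv : (scanB (c :: rest) 0 false).2.1 = (split_u_v (c :: rest)).2 := by
        rw [hsplit.2]; rfl
      have hch : check1 (split_u_v (c :: rest)).1 = true ↔
          ((scanB (c :: rest) 0 false).2.2.1 = 0 ∧ (scanB (c :: rest) 0 false).2.2.2 = false) := by
        rw [← hu]
        simpa [check1] using hcheck
      by_cases hok : (scanB (c :: rest) 0 false).2.2.1 = 0 ∧ (scanB (c :: rest) 0 false).2.2.2 = false
      · rw [if_pos hok, if_pos (hch.mpr hok), ihn _ hle, hu, hv]
        simp
      · rw [if_neg hok]
        have hnc : ¬ check1 (split_u_v (c :: rest)).1 = true := fun h => hok (hch.mp h)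
        rw [if_neg hnc, ihn _ hle, hu, hv, switch_bracket_eq_map]
        simp

theorem loopB_eq (p : List Char) (parts tail : List (List Char)) :
    loopB p parts tail = parts.flatten ++ solutionL p ++ tail.reverse.flatten :=
  loopB_eq_aux p.length p le_rfl parts tail

-- ===== VERDICT (by name: the statement is the Claim_ definition above) =====
theorem solution_spec : Claim_equal_solution := by
  intro p _
  unfold Spec_solution solution solution_alt
  rw [loopB_eq]
  simp
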